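-- pv_equiv track=rewrite | github.com/LucasMagnum/coding-challenges | python/daily_interview_pro/202012/26.py | dfs
-- ===== SOURCE A (Python) =====
-- def dfs(graph, visited, curr, start_word, length):
--     if length == 1:
--         return start_word[0] == curr[-1]
--
--     visited.add(curr)
--     for neighbor in graph[curr[-1]]:
--         if neighbor not in visited:
--             return dfs(graph, visited, neighbor, start_word, length - 1)
--
--     visited.remove(curr)
--     return False
-- ===== SOURCE B (Python) =====
-- def dfs(graph, visited, curr, start_word, length):
--     end = _walk(graph, visited, curr, length - 1)
--     if end is None:
--         return False
--     return start_word[0] == end[-1]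
--
--
-- def _walk(graph, visited, curr, steps):
--     # Follow the first-unvisited-neighbor chain for `steps` hops
--     # (forever if steps is negative); None on a dead end.
--     while steps != 0:
--         visited.add(curr)
--         nxt = next((n for n in graph[curr[-1]] if n not in visited), None)
--         if nxt is None:
--             visited.remove(curr)
--             return None
--         curr = nxt
--         steps -= 1
--     return curr
-- ===== Notes on version B (the rewrite author's own statement) =====
-- stated objective: alternative
-- what changed: A's tail recursion (check length, pick first unvisited neighbor, recurse) is replaced by a two-phase decomposition: an iterative _walk that follows the first-unvisited-neighbor chain to its endpoint, then a single first/last-letter comparison on that endpoint.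
-- outside the precondition, e.g. on dfs({'a': [], 'b': ['x']}, set(), 'za', 'w', 3): A returns False, B returns False; on dfs({'a': []}, set(), 'za', '', 2): A returns False, B returns False
import Mathlib
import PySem

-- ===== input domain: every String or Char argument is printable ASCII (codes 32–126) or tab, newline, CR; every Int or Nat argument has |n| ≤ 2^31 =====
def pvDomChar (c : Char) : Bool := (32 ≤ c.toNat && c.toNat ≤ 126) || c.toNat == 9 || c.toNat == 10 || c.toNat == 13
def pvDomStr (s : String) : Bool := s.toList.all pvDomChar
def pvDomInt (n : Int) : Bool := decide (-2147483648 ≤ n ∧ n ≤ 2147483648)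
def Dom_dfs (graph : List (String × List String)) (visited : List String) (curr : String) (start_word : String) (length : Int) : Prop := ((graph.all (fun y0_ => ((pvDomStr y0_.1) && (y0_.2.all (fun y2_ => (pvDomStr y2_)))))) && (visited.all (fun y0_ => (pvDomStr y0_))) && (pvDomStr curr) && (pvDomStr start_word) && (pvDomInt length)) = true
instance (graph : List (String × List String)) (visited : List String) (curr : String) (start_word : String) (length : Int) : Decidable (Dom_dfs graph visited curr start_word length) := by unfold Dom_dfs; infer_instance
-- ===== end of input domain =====

-- B computes the same greedy single-chain walk, decomposed differently: it first walks the chain to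
-- its endpoint and only then does the single first/last-letter comparison; equivalence is about the
-- RETURN value (both Pythons mutate `visited` identically: add along the path, remove the dead end).

-- termination infrastructure (cited by both ports' decreasing_by):
def pvPool (graph : List (String × List String)) : List String := graph.flatMap Prod.snd
def pvMeasure (graph : List (String × List String)) (visited : List String) (curr : String) : Nat :=
  ((pvPool graph).toFinset.filter (fun s => s ∉ visited ∧ s ≠ curr)).card
theorem pvMem_pool_of_get {graph : List (String × List String)} {k : String} {ns : List String} {n : String}
    (hg : PySem.Dict.get? (PySem.Dict.mk graph) k = some ns) (hn : n ∈ ns) : n ∈ pvPool graph := by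
  simp only [PySem.Dict.get?, Option.map_eq_some_iff] at hg
  obtain ⟨p, hp, hp2⟩ := hg
  exact List.mem_flatMap.2 ⟨p, List.mem_of_find?_eq_some hp, hp2 ▸ hn⟩
theorem pvMeasure_lt {graph : List (String × List String)} {visited : List String} {curr n : String}
    (hpool : n ∈ pvPool graph) (hmem : ¬ n ∈ PySem.Set.add visited curr) :
    pvMeasure graph (PySem.Set.add visited curr) n < pvMeasure graph visited curr := by
  rw [PySem.Set.mem_add] at hmem
  apply Finset.card_lt_card
  rw [Finset.ssubset_iff_of_subset]
  · refine ⟨n, ?_, by simp⟩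
    simp only [Finset.mem_filter, List.mem_toFinset]
    exact ⟨hpool, fun hv => hmem (Or.inl hv), fun hc => hmem (Or.inr hc)⟩
  · intro x hx
    simp only [Finset.mem_filter, List.mem_toFinset, PySem.Set.mem_add] at hx ⊢
    exact ⟨hx.1, fun hv => hx.2.1 (Or.inl hv), fun hc => hx.2.1 (Or.inr hc)⟩

-- ===== PORT A =====
-- A's for-loop with its early return, as a helper: first neighbour not yet visited (none = fell through)
def firstUnvisitedA (neighbors : List String) (visited : PySem.Set String) : Option String :=
  match neighbors with
  | [] => none
  | x :: rest => if PySem.Set.contains visited x then firstUnvisitedA rest visited else some x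
theorem firstUnvisitedA_spec {neighbors : List String} {visited : PySem.Set String} {n : String}
    (h : firstUnvisitedA neighbors visited = some n) : n ∈ neighbors ∧ ¬ n ∈ visited := by
  induction neighbors with
  | nil => simp [firstUnvisitedA] at h
  | cons x rest ih =>
    rw [firstUnvisitedA] at h
    by_cases hc : PySem.Set.contains visited x
    · rw [if_pos hc] at h
      exact ⟨List.mem_cons_of_mem x (ih h).1, (ih h).2⟩
    · rw [if_neg hc] at h
      cases h
      exact ⟨List.mem_cons_self, fun hm => hc ((PySem.Set.contains_iff visited n).2 hm)⟩

def dfs (graph : List (String × List String)) (visited : List String) (curr : String) (start_word : String) (length : Int) : Bool :=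
  if length == 1 then
    match PySem.Str.pyGet? start_word 0, PySem.Str.pyGet? curr (-1) with
    | some a, some b => a == b
    | _, _ => false
  else
    match PySem.Str.pyGet? curr (-1) with
    | none => false
    | some c =>
      match hg : PySem.Dict.get? (PySem.Dict.mk graph) (String.ofList [c]) with
      | none => false
      | some neighbors =>
        match hf : firstUnvisitedA neighbors (PySem.Set.add visited curr) with
        | some n => dfs graph (PySem.Set.add visited curr) n start_word (length - 1)
        | none => false
termination_by pvMeasure graph visited curr
decreasing_by
  exact pvMeasure_lt (pvMem_pool_of_get hg (firstUnvisitedA_spec hf).1) (firstUnvisitedA_spec hf).2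

-- ===== PORT B =====
-- Source B's `next((n for n in graph[curr[-1]] if n not in visited), None)` as one helper
def nextUnvisited (graph : List (String × List String)) (visited : PySem.Set String) (curr : String) : Option String :=
  match PySem.Str.pyGet? curr (-1) with
  | some c =>
    match PySem.Dict.get? (PySem.Dict.mk graph) (String.ofList [c]) with
    | some neighbors => neighbors.find? (fun n => !(PySem.Set.contains visited n))
    | none => none
  | none => none

theorem nextUnvisited_spec {graph : List (String × List String)} {visited : PySem.Set String} {curr n : String}
    (h : nextUnvisited graph visited curr = some n) : n ∈ pvPool graph ∧ ¬ n ∈ visited := by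
  rw [nextUnvisited] at h
  split at h
  · split at h
    · rename_i hg
      refine ⟨pvMem_pool_of_get hg (List.mem_of_find?_eq_some h), fun hm => ?_⟩
      have h2 := List.find?_some h
      rw [(PySem.Set.contains_iff visited n).2 hm] at h2
      simp at h2
    · exact absurd h (by simp)
  · exact absurd h (by simp)

-- Source B's _walk loop
def walkB (graph : List (String × List String)) (visited : List String) (curr : String) (steps : Int) : Option String :=
  if steps == 0 then some curr
  else
    match hn : nextUnvisited graph (PySem.Set.add visited curr) curr with
    | none => none
    | some n => walkB graph (PySem.Set.add visited curr) n (steps - 1)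
termination_by pvMeasure graph visited curr
decreasing_by
  exact pvMeasure_lt (nextUnvisited_spec hn).1 (nextUnvisited_spec hn).2


def dfs_alt (graph : List (String × List String)) (visited : List String) (curr : String) (start_word : String) (length : Int) : Bool :=
  match walkB graph visited curr (length - 1) with
  | some e =>
    match PySem.Str.pyGet? start_word 0 with
    | some a =>
      match PySem.Str.pyGet? e (-1) with
      | some b => a == b
      | none => false
    | none => false
  | none => false

-- ===== PRECONDITION & SPEC =====
-- does w end in a character that (as a one-character string) is a key of graph?
def pvKeyOk (graph : List (String × List String)) (w : String) : Bool :=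
  match w.toList.getLast? with
  | some ch => graph.any (fun p => p.1 == String.ofList [ch])
  | none => false

-- Pre_ excludes exactly the raising inputs it can name in closed form: A raises IndexError on an empty
-- start_word/curr/neighbour and KeyError on a last letter absent from graph's keys; being a closed-form
-- safety over-approximation it also excludes some inputs whose walk happens to dead-end before ever
-- reaching an empty or unkeyed neighbour (A returns False there, and so does B; see cites).
def Pre_dfs (graph : List (String × List String)) (visited : List String) (curr : String) (start_word : String) (length : Int) : Prop :=
  curr ≠ "" ∧ (length ≤ 0 ∨ start_word ≠ "") ∧
  (length = 1 ∨
    (pvKeyOk graph curr = true ∧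
     ∀ p ∈ graph, ∀ n ∈ p.2, n ∈ visited ∨ (n ≠ "" ∧ (length = 2 ∨ pvKeyOk graph n = true))))
instance (graph : List (String × List String)) (visited : List String) (curr : String) (start_word : String) (length : Int) : Decidable (Pre_dfs graph visited curr start_word length) := by unfold Pre_dfs; infer_instance

def pvWitness_dfs : (List (String × List String)) × List String × String × String × Int :=
  ([("t", ["cat", "tot"]), ("a", [])], [], "rat", "cab", 3)

def Spec_dfs (graph : List (String × List String)) (visited : List String) (curr : String) (start_word : String) (length : Int) (out : Bool) : Prop := out = dfs_alt graph visited curr start_word length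
instance (graph : List (String × List String)) (visited : List String) (curr : String) (start_word : String) (length : Int) (out : Bool) : Decidable (Spec_dfs graph visited curr start_word length out) := by unfold Spec_dfs; infer_instance

-- ===== CLAIM (what is proved, stated in full; the proofs are below) =====
def Claim_equal_dfs : Prop := ∀ (graph : List (String × List String)) (visited : List String) (curr : String) (start_word : String) (length : Int), Dom_dfs graph visited curr start_word length → Pre_dfs graph visited curr start_word length → Spec_dfs graph visited curr start_word length (dfs graph visited curr start_word length)

-- ===== LEMMAS AND PROOFS =====

theorem firstUnvisitedA_eq_find? (neighbors : List String) (visited : PySem.Set String) :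
    firstUnvisitedA neighbors visited = neighbors.find? (fun n => !(PySem.Set.contains visited n)) := by
  induction neighbors with
  | nil => simp [firstUnvisitedA]
  | cons x rest ih =>
    rw [firstUnvisitedA, List.find?]
    by_cases hc : x ∈ visited <;> simp [hc, ih]

theorem walkB_zero (graph : List (String × List String)) (visited : List String) (curr : String)
    {steps : Int} (h : steps = 0) : walkB graph visited curr steps = some curr := by
  rw [walkB]; simp [h]

theorem walkB_step (graph : List (String × List String)) (visited : List String) (curr : String)
    {steps : Int} (h : steps ≠ 0) :
    walkB graph visited curr steps =
      (match nextUnvisited graph (PySem.Set.add visited curr) curr with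
       | none => none
       | some n => walkB graph (PySem.Set.add visited curr) n (steps - 1)) := by
  rw [walkB, if_neg (show ¬((steps == 0) = true) by simp [h])]
  split <;> rename_i hn <;> rw [hn]

theorem dfs_eq_walkB (graph : List (String × List String)) (start_word : String)
    (visited : List String) (curr : String) (length : Int) :
    dfs graph visited curr start_word length =
      (match walkB graph visited curr (length - 1) with
       | some e =>
         match PySem.Str.pyGet? start_word 0 with
         | some a =>
           match PySem.Str.pyGet? e (-1) with
           | some b => a == b
           | none => false
         | none => false
       | none => false) := by
  fun_induction dfs graph visited curr start_word length with
  | case1 visited curr length h a b hb ha =>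
    have h1 : length - 1 = 0 := by simp at h; omega
    rw [walkB_zero graph visited curr h1]
    simp at ha hb
    simp [ha, hb]
  | case2 visited curr length h hfb =>
    have h1 : length - 1 = 0 := by simp at h; omega
    rw [walkB_zero graph visited curr h1]
    simp at hfb
    cases hx : PySem.List.pyGet? start_word.toList 0 with
    | none => simp [hx]
    | some a =>
      cases hy : PySem.List.pyGet? curr.toList (-1) with
      | none => simp [hx, hy]
      | some b => exact absurd hy (hfb a b hx)
  | case3 visited curr length h hget =>
    have h1 : length - 1 ≠ 0 := by simp at h; omega
    rw [walkB_step graph visited curr h1]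
    have hn : nextUnvisited graph (PySem.Set.add visited curr) curr = none := by
      simp at hget
      simp [nextUnvisited, hget]
    rw [hn]
  | case4 visited curr length h c hget hg =>
    have h1 : length - 1 ≠ 0 := by simp at h; omega
    rw [walkB_step graph visited curr h1]
    have hn : nextUnvisited graph (PySem.Set.add visited curr) curr = none := by
      simp at hget
      simp [nextUnvisited, hget, hg]
    rw [hn]
  | case5 visited curr length h c hget neighbors hg n hf ih =>
    have h1 : length - 1 ≠ 0 := by simp at h; omega
    rw [walkB_step graph visited curr h1]
    have hn : nextUnvisited graph (PySem.Set.add visited curr) curr = some n := by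
      simp only [PySem.Str.pyGet?] at hget
      rw [nextUnvisited]
      simp only [PySem.Str.pyGet?, hget, hg, ← firstUnvisitedA_eq_find?, hf]
    rw [hn]
    simpa using ih
  | case6 visited curr length h c hget neighbors hg hf =>
    have h1 : length - 1 ≠ 0 := by simp at h; omega
    rw [walkB_step graph visited curr h1]
    have hn : nextUnvisited graph (PySem.Set.add visited curr) curr = none := by
      simp only [PySem.Str.pyGet?] at hget
      rw [nextUnvisited]
      simp only [PySem.Str.pyGet?, hget, hg, ← firstUnvisitedA_eq_find?, hf]
    rw [hn]

-- ===== VERDICT (by name: the statement is the Claim_ definition above) =====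
theorem dfs_spec : Claim_equal_dfs := by
  intro graph visited curr start_word length _ _
  unfold Spec_dfs dfs_alt
  exact dfs_eq_walkB graph start_word visited curr length
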